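-- pv_equiv track=rewrite | github.com/maxziller/MonitoriaED2 | Problemas - Semana 6/Cargueiros.py | inserecarga
-- ===== SOURCE A (Python) =====
-- def inserecarga(pilhas, carga):
--     i = 0
--     while (i < len(pilhas)):
--         if (pilhas[i] >= carga):
--             pilhas[i] = carga
--             return pilhas
--         else:
--             i += 1
--     pilhas.append(carga)
--     return pilhas
-- ===== SOURCE B (Python) =====
-- def inserecarga(pilhas, carga):
--     # binary search (bisect_left, hand-written since A imports nothing)
--     lo, hi = 0, len(pilhas)
--     while lo < hi:
--         mid = (lo + hi) // 2
--         if pilhas[mid] < carga: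
--             lo = mid + 1
--         else:
--             hi = mid
--     if lo < len(pilhas):
--         pilhas[lo] = carga
--     else:
--         pilhas.append(carga)
--     return pilhas
-- ===== Notes on version B (the rewrite author's own statement) =====
-- stated objective: faster
-- what changed: Replaces the left-to-right linear scan for the first pile >= carga with a hand-written binary search (bisect_left) over the sorted pile list, then one set-or-append.
-- outside the precondition, e.g. on inserecarga([3, 1], 2): A returns [2, 1], B returns [3, 1, 2]
import Mathlib
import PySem

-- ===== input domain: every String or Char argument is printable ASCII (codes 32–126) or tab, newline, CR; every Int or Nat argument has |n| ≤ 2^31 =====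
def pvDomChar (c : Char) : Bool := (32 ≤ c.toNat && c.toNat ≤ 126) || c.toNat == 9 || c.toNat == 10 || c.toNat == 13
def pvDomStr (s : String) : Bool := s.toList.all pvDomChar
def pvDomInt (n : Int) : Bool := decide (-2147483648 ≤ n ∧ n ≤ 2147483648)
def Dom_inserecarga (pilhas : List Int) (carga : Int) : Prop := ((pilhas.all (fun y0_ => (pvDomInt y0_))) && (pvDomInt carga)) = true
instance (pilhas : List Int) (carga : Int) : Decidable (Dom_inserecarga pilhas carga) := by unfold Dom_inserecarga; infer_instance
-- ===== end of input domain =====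

-- B replaces A's linear scan for the first pile ≥ carga by a binary search over the
-- (sorted, per Pre_) pile list; equivalence is about the RETURN value (both Pythons
-- mutate `pilhas` in place in the same way).

-- ===== PORT A =====
-- A's while-loop: scan left to right; at the first element ≥ carga overwrite it and
-- return; if the scan falls off the end, append carga.
def inserecarga (pilhas : List Int) (carga : Int) : List Int :=
  match pilhas with
  | [] => [carga]                                   -- loop ended: pilhas.append(carga)
  | x :: xs =>
    if x ≥ carga then carga :: xs                   -- pilhas[i] = carga; return
    else x :: inserecarga xs carga                  -- i += 1

-- ===== PORT B =====
-- Source B's hand-written bisect_left loop (lo/hi/mid).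
def pvBisect (pilhas : List Int) (carga : Int) (lo hi : Nat) : Nat :=
  if _h : lo < hi then
    if pilhas.getD ((lo + hi) / 2) 0 < carga then
      pvBisect pilhas carga ((lo + hi) / 2 + 1) hi
    else
      pvBisect pilhas carga lo ((lo + hi) / 2)
  else lo
termination_by hi - lo
decreasing_by all_goals omega

def inserecarga_alt (pilhas : List Int) (carga : Int) : List Int :=
  let lo := pvBisect pilhas carga 0 pilhas.length
  if lo < pilhas.length then pilhas.set lo carga else pilhas ++ [carga]

-- ===== PRECONDITION & SPEC =====
-- Pre_ requires the piles partitioned w.r.t. carga (every pile < carga precedes every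
-- pile ≥ carga) — true in particular of the sorted pile lists this patience-style helper
-- is used on; on other lists A still returns but a binary search is meaningless there,
-- so those inputs are excluded.
def Pre_inserecarga (pilhas : List Int) (carga : Int) : Prop :=
  ∀ i, i < pilhas.length → ∀ j, j < pilhas.length → i ≤ j →
    pilhas.getD j 0 < carga → pilhas.getD i 0 < carga
instance (pilhas : List Int) (carga : Int) : Decidable (Pre_inserecarga pilhas carga) := by unfold Pre_inserecarga; infer_instance

def pvWitness_inserecarga : List Int × Int := ([1, 3, 5], 4)

def Spec_inserecarga (pilhas : List Int) (carga : Int) (out : List Int) : Prop := out = inserecarga_alt pilhas carga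
instance (pilhas : List Int) (carga : Int) (out : List Int) : Decidable (Spec_inserecarga pilhas carga out) := by unfold Spec_inserecarga; infer_instance

-- ===== CLAIM (what is proved, stated in full; the proofs are below) =====
def Claim_equal_inserecarga : Prop := ∀ (pilhas : List Int) (carga : Int), Dom_inserecarga pilhas carga → Pre_inserecarga pilhas carga → Spec_inserecarga pilhas carga (inserecarga pilhas carga)

-- ===== LEMMAS AND PROOFS =====

-- index of the first element ≥ carga (length of the list if none)
def pvFirstGE (pilhas : List Int) (carga : Int) : Nat :=
  (pilhas.takeWhile (fun x => decide (x < carga))).length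

theorem pvFirstGE_le (xs : List Int) (c : Int) : pvFirstGE xs c ≤ xs.length := by
  unfold pvFirstGE; exact (List.takeWhile_sublist _).length_le

theorem pvFirstGE_lt (xs : List Int) (c : Int) :
    ∀ k, k < pvFirstGE xs c → xs.getD k 0 < c := by
  induction xs with
  | nil => intro k hk; simp [pvFirstGE] at hk
  | cons x xs ih =>
    intro k hk
    by_cases hx : x < c
    · cases k with
      | zero => simpa using hx
      | succ k =>
        simp only [pvFirstGE, List.takeWhile_cons, hx, decide_true] at hk
        exact ih k (Nat.lt_of_succ_lt_succ hk)
    · simp [pvFirstGE, hx] at hk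

theorem pvFirstGE_ge (xs : List Int) (c : Int) :
    pvFirstGE xs c < xs.length → c ≤ xs.getD (pvFirstGE xs c) 0 := by
  induction xs with
  | nil => intro h; simp [pvFirstGE] at h
  | cons x xs ih =>
    intro h
    by_cases hx : x < c
    · simp only [pvFirstGE, List.takeWhile_cons, hx, decide_true, List.length_cons] at h ⊢
      exact ih (Nat.lt_of_succ_lt_succ h)
    · simp [pvFirstGE, hx]
      omega

-- uniqueness of the "first index ≥ c" characterisation
theorem pvFirstGE_unique (xs : List Int) (c : Int) (r : Nat)
    (hr : r ≤ xs.length)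
    (hlt : ∀ k, k < r → xs.getD k 0 < c)
    (hge : ∀ k, r ≤ k → k < xs.length → c ≤ xs.getD k 0) :
    r = pvFirstGE xs c := by
  rcases Nat.lt_trichotomy r (pvFirstGE xs c) with h | h | h
  · have h1 := pvFirstGE_lt xs c r h
    have h2 := hge r (Nat.le_refl r) (Nat.lt_of_lt_of_le h (pvFirstGE_le xs c))
    omega
  · exact h
  · have hlen : pvFirstGE xs c < xs.length := Nat.lt_of_lt_of_le h hr
    have h1 := pvFirstGE_ge xs c hlen
    have h2 := hlt _ h
    omega

-- the bisect loop finds pvFirstGE on lists partitioned w.r.t. c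
theorem pvBisect_eq (xs : List Int) (c : Int) (hs : Pre_inserecarga xs c) :
    ∀ n lo hi, hi - lo ≤ n → lo ≤ hi → hi ≤ xs.length →
      (∀ k, k < lo → xs.getD k 0 < c) →
      (∀ k, hi ≤ k → k < xs.length → c ≤ xs.getD k 0) →
      pvBisect xs c lo hi = pvFirstGE xs c := by
  intro n
  induction n with
  | zero =>
    intro lo hi hm hlohi hhi hlt hge
    have : lo = hi := by omega
    subst this
    rw [pvBisect]; simp only [lt_irrefl, dite_false]
    exact pvFirstGE_unique xs c lo hhi hlt hge
  | succ n ih =>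
    intro lo hi hm hlohi hhi hlt hge
    rw [pvBisect]
    by_cases h : lo < hi
    · simp only [h, dite_true]
      have hmidlt : (lo + hi) / 2 < xs.length := by omega
      by_cases hcmp : xs.getD ((lo + hi) / 2) 0 < c
      · simp only [hcmp, if_true]
        apply ih _ hi (by omega) (by omega) hhi _ hge
        intro k hk
        rcases Nat.lt_or_ge k lo with hk' | hk'
        · exact hlt k hk'
        · exact hs k (by omega) _ hmidlt (by omega) hcmp
      · simp only [hcmp, if_false]
        apply ih lo _ (by omega) (by omega) (by omega) hlt
        intro k hmk hk
        by_contra hcon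
        exact hcmp (hs _ hmidlt k hk hmk (by omega))
    · simp only [h, dite_false]
      have : lo = hi := by omega
      subst this
      exact pvFirstGE_unique xs c lo hhi hlt hge

-- A's scan in terms of pvFirstGE (no sortedness needed)
theorem inserecarga_eq_firstGE (xs : List Int) (c : Int) :
    inserecarga xs c =
      if pvFirstGE xs c < xs.length then xs.set (pvFirstGE xs c) c else xs ++ [c] := by
  induction xs with
  | nil => simp [inserecarga, pvFirstGE]
  | cons x xs ih =>
    by_cases hx : x < c
    · have hx' : ¬ x ≥ c := by omega
      simp only [inserecarga, hx', if_false, ih,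
        pvFirstGE, List.takeWhile_cons, hx, decide_true, List.length_cons]
      by_cases h : (xs.takeWhile (fun y => decide (y < c))).length < xs.length
      · simp [h, Nat.succ_lt_succ h, List.set_cons_succ]
      · have h2 : ¬ ((xs.takeWhile (fun y => decide (y < c))).length + 1 < xs.length + 1) := by omega
        simp [h, h2]
    · have hx' : x ≥ c := by omega
      simp [inserecarga, hx', pvFirstGE, hx]

-- ===== VERDICT (by name: the statement is the Claim_ definition above) =====
theorem inserecarga_spec : Claim_equal_inserecarga := by
  intro pilhas carga _ hpre
  show inserecarga pilhas carga = inserecarga_alt pilhas carga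
  have hb := pvBisect_eq pilhas carga hpre pilhas.length 0 pilhas.length
    (by omega) (Nat.zero_le _) (le_refl _)
    (by intro k hk; omega)
    (by intro k hk hk2; omega)
  rw [inserecarga_eq_firstGE]
  simp only [inserecarga_alt, hb]
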